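-- pv_equiv track=rewrite | github.com/ycm-core/ycmd | ycmd/completers/cpp/flags.py | _RemoveXclangFlags
-- ===== SOURCE A (Python) =====
-- def _RemoveXclangFlags( flags ):
--   """Drops -Xclang flags.  These are typically used to pass in options to
--   clang cc1 which are not used in the front-end, so they are not needed for
--   code completion."""
--
--   sanitized_flags = []
--   saw_xclang = False
--   for flag in flags:
--     if flag == '-Xclang':
--       saw_xclang = True
--       continue
--     elif saw_xclang:
--       saw_xclang = False
--       continue
--
--     sanitized_flags.append( flag )
--
--   return sanitized_flags
-- ===== SOURCE B (Python) =====
-- def _RemoveXclangFlags( flags ):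
--   """Drops -Xclang flags and their arguments, stateless pairwise version."""
--   return [ flag for prev, flag in zip( [ None ] + list( flags ), flags )
--            if flag != '-Xclang' and prev != '-Xclang' ]
-- ===== Notes on version B (the rewrite author's own statement) =====
-- stated objective: idiomatic
-- what changed: Replaces the stateful loop with a saw_xclang boolean by a stateless comprehension over (predecessor, flag) pairs (zip with the shifted list): keep a flag iff neither it nor its predecessor is '-Xclang'.
import Mathlib
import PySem

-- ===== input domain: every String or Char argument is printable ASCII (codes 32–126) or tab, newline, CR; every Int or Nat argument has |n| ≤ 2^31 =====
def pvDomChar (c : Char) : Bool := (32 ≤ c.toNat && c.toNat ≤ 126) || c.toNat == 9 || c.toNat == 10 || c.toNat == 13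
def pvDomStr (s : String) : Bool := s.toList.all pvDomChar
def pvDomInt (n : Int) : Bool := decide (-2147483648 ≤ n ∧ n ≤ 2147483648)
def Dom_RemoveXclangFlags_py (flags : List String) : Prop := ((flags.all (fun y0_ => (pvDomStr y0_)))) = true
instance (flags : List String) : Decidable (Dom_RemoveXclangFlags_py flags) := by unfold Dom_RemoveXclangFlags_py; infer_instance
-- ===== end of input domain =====

-- ===== PORT A =====
-- Port of A: foldl carrying (sanitized_flags, saw_xclang), exactly A's loop.
def RemoveXclangFlags_py (flags : List String) : List String :=
  (flags.foldl (fun (st : List String × Bool) flag =>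
      if flag = "-Xclang" then (st.1, true)
      else if st.2 then (st.1, false)
      else (st.1 ++ [flag], st.2)) ([], false)).1

-- ===== PORT B =====
-- Port of B: stateless filter over (predecessor, flag) pairs from zip with the shifted list.
def RemoveXclangFlags_py_alt (flags : List String) : List String :=
  ((((none : Option String) :: flags.map some).zip flags).filter
      (fun p => p.2 ≠ "-Xclang" ∧ p.1 ≠ some "-Xclang")).map (·.2)

-- ===== PRECONDITION & SPEC =====
def Spec_RemoveXclangFlags_py (flags : List String) (out : List String) : Prop := out = RemoveXclangFlags_py_alt flags
instance (flags : List String) (out : List String) : Decidable (Spec_RemoveXclangFlags_py flags out) := by unfold Spec_RemoveXclangFlags_py; infer_instance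

-- ===== CLAIM (what is proved, stated in full; the proofs are below) =====
def Claim_equal_RemoveXclangFlags_py : Prop := ∀ (flags : List String), Dom_RemoveXclangFlags_py flags → Spec_RemoveXclangFlags_py flags (RemoveXclangFlags_py flags)

-- ===== LEMMAS AND PROOFS =====

-- Common specification of the result: keep each flag iff neither it nor its predecessor is "-Xclang".
def pvKeep (saw : Bool) : List String → List String
  | [] => []
  | f :: r =>
      if f = "-Xclang" then pvKeep true r
      else if saw then pvKeep false r
      else f :: pvKeep false r

theorem pvA_loop (flags : List String) (acc : List String) (saw : Bool) :
    (flags.foldl (fun (st : List String × Bool) flag =>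
        if flag = "-Xclang" then (st.1, true)
        else if st.2 then (st.1, false)
        else (st.1 ++ [flag], st.2)) (acc, saw)).1 = acc ++ pvKeep saw flags := by
  induction flags generalizing acc saw with
  | nil => simp [pvKeep]
  | cons f r ih =>
      by_cases h : f = "-Xclang"
      · simp [List.foldl, h, pvKeep, ih]
      · cases saw <;> simp [List.foldl, h, pvKeep, ih]

theorem pvB_loop (flags : List String) (p : Option String) :
    (((p :: flags.map some).zip flags).filter
        (fun q => q.2 ≠ "-Xclang" ∧ q.1 ≠ some "-Xclang")).map (·.2)
      = pvKeep (p = some "-Xclang") flags := by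
  induction flags generalizing p with
  | nil => simp [pvKeep]
  | cons f r ih =>
      have ihf := ih (some f)
      by_cases h : f = "-Xclang" <;> by_cases hp : p = some "-Xclang" <;>
        · simp [List.zip, List.zipWith, h, hp, pvKeep] at ihf ⊢
          simpa [h] using ihf

-- ===== VERDICT (by name: the statement is the Claim_ definition above) =====
theorem RemoveXclangFlags_py_spec : Claim_equal_RemoveXclangFlags_py := by
  intro flags _
  show RemoveXclangFlags_py flags = RemoveXclangFlags_py_alt flags
  rw [RemoveXclangFlags_py, RemoveXclangFlags_py_alt, pvA_loop, pvB_loop]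
  simp
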